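-- pv_equiv track=rewrite | github.com/TejusHP/StudentSage | StudentSage/demoquiz-main/firstapp/rag.py | count_result_status
-- ===== SOURCE A (Python) =====
-- def count_result_status(data):
--     result=[0,0,0]
--     for question in data["questions"]:
--         if question["answer_given"]=='correct':
--             result[0]+=1
--         elif question["answer_given"]=='incorrect':
--             result[1]+=1
--         elif question["answer_given"]=='unattempted':
--             result[2]+=1
--     return result
-- ===== SOURCE B (Python) =====
-- def count_result_status(data):
--     answers = [q["answer_given"] for q in data["questions"]]
--     return [answers.count('correct'), answers.count('incorrect'), answers.count('unattempted')]
-- ===== Notes on version B (the rewrite author's own statement) =====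
-- stated objective: idiomatic
-- what changed: Replaces the if/elif accumulator loop over mutable counters with extracting the answer list once and taking three list.count aggregations, eliminating the conditional branching entirely.
import Mathlib
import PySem

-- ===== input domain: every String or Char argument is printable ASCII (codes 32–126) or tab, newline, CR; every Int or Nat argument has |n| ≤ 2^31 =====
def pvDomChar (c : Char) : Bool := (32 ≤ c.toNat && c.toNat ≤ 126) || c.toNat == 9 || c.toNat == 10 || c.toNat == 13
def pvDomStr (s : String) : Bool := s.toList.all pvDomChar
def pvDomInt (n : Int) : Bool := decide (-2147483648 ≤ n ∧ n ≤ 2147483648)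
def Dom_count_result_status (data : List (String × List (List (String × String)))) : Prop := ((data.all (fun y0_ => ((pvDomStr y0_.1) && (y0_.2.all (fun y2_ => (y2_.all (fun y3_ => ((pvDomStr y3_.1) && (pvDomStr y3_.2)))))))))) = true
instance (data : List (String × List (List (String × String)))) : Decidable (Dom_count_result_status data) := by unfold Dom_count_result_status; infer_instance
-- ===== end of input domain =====

-- B replaces the if/elif counter loop with one list of answers and three list.count aggregations (idiomatic; same cost).

-- ===== PORT A =====
-- A: result=[0,0,0]; for question in data["questions"]: if/elif increments; return result.
-- Missing keys raise KeyError in Python; Pre_ excludes them (the `none` fallbacks below are unreachable inside Pre_).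
def count_result_status (data : List (String × List (List (String × String)))) : List Int :=
  match (PySem.Dict.mk data).get? "questions" with
  | none => []
  | some qs =>
    let r := qs.foldl (fun (r : Int × Int × Int) q =>
      match (PySem.Dict.mk q).get? "answer_given" with
      | none => r
      | some a =>
        if a == "correct" then (r.1 + 1, r.2.1, r.2.2)
        else if a == "incorrect" then (r.1, r.2.1 + 1, r.2.2)
        else if a == "unattempted" then (r.1, r.2.1, r.2.2 + 1)
        else r) (0, 0, 0)
    [r.1, r.2.1, r.2.2]

-- ===== PORT B =====
-- B: answers = [q["answer_given"] for q in data["questions"]]; return three .count values.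
def count_result_status_alt (data : List (String × List (List (String × String)))) : List Int :=
  match (PySem.Dict.mk data).get? "questions" with
  | none => []
  | some qs =>
    let answers := qs.map (fun q => ((PySem.Dict.mk q).get? "answer_given").getD "")
    [(PySem.List.count answers "correct" : Int),
     (PySem.List.count answers "incorrect" : Int),
     (PySem.List.count answers "unattempted" : Int)]

-- ===== PRECONDITION & SPEC =====
-- Pre_: data has a "questions" key and every question has an "answer_given" key; Python A raises KeyError otherwise.
def Pre_count_result_status (data : List (String × List (List (String × String)))) : Prop :=
  (((PySem.Dict.mk data).get? "questions").map
    (fun qs => qs.all (fun q => ((PySem.Dict.mk q).get? "answer_given").isSome))).getD false = true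
instance (data : List (String × List (List (String × String)))) : Decidable (Pre_count_result_status data) := by unfold Pre_count_result_status; infer_instance
def pvWitness_count_result_status : (List (String × List (List (String × String)))) :=
  [("questions", [[("answer_given", "correct")], [("answer_given", "wrong")]])]
def Spec_count_result_status (data : List (String × List (List (String × String)))) (out : List Int) : Prop := out = count_result_status_alt data
instance (data : List (String × List (List (String × String)))) (out : List Int) : Decidable (Spec_count_result_status data out) := by unfold Spec_count_result_status; infer_instance

-- ===== CLAIM (what is proved, stated in full; the proofs are below) =====
def Claim_equal_count_result_status : Prop := ∀ (data : List (String × List (List (String × String)))), Dom_count_result_status data → Pre_count_result_status data → Spec_count_result_status data (count_result_status data)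

-- ===== LEMMAS AND PROOFS =====

-- The A-side fold over questions, all of which have an "answer_given" key, adds the three
-- counts of the mapped answer list to the accumulator.
lemma foldA_counts (qs : List (List (String × String)))
    (h : qs.all (fun q => ((PySem.Dict.mk q).get? "answer_given").isSome) = true)
    (r : Int × Int × Int) :
    qs.foldl (fun (r : Int × Int × Int) q =>
      match (PySem.Dict.mk q).get? "answer_given" with
      | none => r
      | some a =>
        if a == "correct" then (r.1 + 1, r.2.1, r.2.2)
        else if a == "incorrect" then (r.1, r.2.1 + 1, r.2.2)
        else if a == "unattempted" then (r.1, r.2.1, r.2.2 + 1)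
        else r) r
    = (r.1 + PySem.List.count (qs.map (fun q => ((PySem.Dict.mk q).get? "answer_given").getD "")) "correct",
       r.2.1 + PySem.List.count (qs.map (fun q => ((PySem.Dict.mk q).get? "answer_given").getD "")) "incorrect",
       r.2.2 + PySem.List.count (qs.map (fun q => ((PySem.Dict.mk q).get? "answer_given").getD "")) "unattempted") := by
  induction qs generalizing r with
  | nil => simp [PySem.List.count_eq]
  | cons q qs ih =>
    simp only [List.all_cons, Bool.and_eq_true] at h
    obtain ⟨hq, hqs⟩ := h
    obtain ⟨a, ha⟩ := Option.isSome_iff_exists.mp hq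
    simp only [List.foldl_cons, List.map_cons, ha, Option.getD_some]
    rw [ih hqs]
    simp only [PySem.List.count_eq, List.count_cons]
    split_ifs with h1 h2 h3 <;> simp_all [Prod.ext_iff] <;> push_cast <;> ring

-- ===== VERDICT (by name: the statement is the Claim_ definition above) =====
theorem count_result_status_spec : Claim_equal_count_result_status := by
  intro data _ hpre
  unfold Spec_count_result_status count_result_status count_result_status_alt
  unfold Pre_count_result_status at hpre
  cases hq : (PySem.Dict.mk data).get? "questions" with
  | none => simp [hq] at hpre
  | some qs =>
    rw [hq] at hpre
    simp only [Option.map_some, Option.getD_some] at hpre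
    simp only [foldA_counts qs hpre (0, 0, 0)]
    simp
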